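-- pv_equiv track=rewrite | github.com/pangeran-bottor/coding_challenges | codechef/june_challenge_2020_div_2/2.py | solve
-- ===== SOURCE A (Python) =====
-- def solve(S):
--     S = list(S)
--     ans = 0
--     cur_pair = []
--     while S:
--         if len(cur_pair) < 2:
--             cur_pair.append(S.pop())
--         elif "x" in cur_pair and "y" in cur_pair:
--             ans += 1
--             cur_pair = []
--         else:
--             cur_pair.pop(0)
--         if len(S) == 0 and "x" in cur_pair and "y" in cur_pair:
--             ans += 1
--     return ans
-- ===== SOURCE B (Python) =====
-- def solve(S):
--     ans = 0
--     i = 0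
--     n = len(S)
--     while i < n - 1:
--         if {S[i], S[i + 1]} == {"x", "y"}:
--             ans += 1
--             i += 2
--         else:
--             i += 1
--     return ans
-- ===== Notes on version B (the rewrite author's own statement) =====
-- stated objective: simpler
-- what changed: B replaces A's right-to-left machine (input list popped as a stack into a 2-element window with membership tests, pop(0) shifting and a duplicated end-of-loop check) by a single forward index scan that counts and skips an adjacent {'x','y'} pair; equality rests on greedy pairing from either end giving the same count.
import Mathlib
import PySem

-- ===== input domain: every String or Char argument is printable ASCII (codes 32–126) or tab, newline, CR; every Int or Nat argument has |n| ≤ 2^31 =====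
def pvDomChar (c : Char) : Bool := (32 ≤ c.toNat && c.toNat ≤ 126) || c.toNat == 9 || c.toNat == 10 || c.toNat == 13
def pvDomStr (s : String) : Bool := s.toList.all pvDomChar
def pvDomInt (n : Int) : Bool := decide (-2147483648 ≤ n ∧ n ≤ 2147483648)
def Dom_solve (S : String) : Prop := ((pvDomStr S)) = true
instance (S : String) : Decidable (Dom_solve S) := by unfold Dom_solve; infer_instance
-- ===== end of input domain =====

-- B simplifies A's stack-pop/two-element-window machine to a forward two-pointer scan
-- counting non-overlapping adjacent {'x','y'} pairs; same count, scanned from the other end.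

-- ===== PORT A =====
-- A pops characters from the END of S into a ≤2-element window `cur`, counts a pair when
-- the window contains both 'x' and 'y', else shifts the window; an extra check at the end
-- of each iteration counts a final matching window once S is exhausted.
-- `S.pop()` removes the LAST element, so the loop consumes S.toList.reverse front-first.
def loopA : List Char → List Char → Int → Int
  | [], _, ans => ans                        -- while S: loop exits
  | c :: R, cur, ans =>
    if cur.length < 2 then
      -- cur_pair.append(S.pop()); then the end-of-iteration check (S is now R)
      if R = [] ∧ 'x' ∈ cur ++ [c] ∧ 'y' ∈ cur ++ [c] then loopA R (cur ++ [c]) (ans + 1)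
      else loopA R (cur ++ [c]) ans
    else if 'x' ∈ cur ∧ 'y' ∈ cur then
      -- ans += 1; cur_pair = []; end-of-iteration check is false: S = c :: R ≠ [] (nothing popped)
      loopA (c :: R) [] (ans + 1)
    else
      -- cur_pair.pop(0); end-of-iteration check false for the same reason
      loopA (c :: R) cur.tail ans
termination_by R cur _ => 2 * R.length + cur.length
decreasing_by all_goals simp_all [List.length_tail]; omega

def solve (S : String) : Int := loopA S.toList.reverse [] 0

-- ===== PORT B =====
-- {S[i], S[i+1]} == {'x','y'} for two chars is exactly: one is 'x' and the other 'y'.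
def pairXY (a b : Char) : Bool := (a == 'x' && b == 'y') || (a == 'y' && b == 'x')

-- the forward index scan: consume two chars on a match (i += 2), one otherwise (i += 1)
def altLoop : List Char → Int
  | a :: b :: t => if pairXY a b then 1 + altLoop t else altLoop (b :: t)
  | _ => 0

def solve_alt (S : String) : Int := altLoop S.toList

-- ===== PRECONDITION & SPEC =====
def Spec_solve (S : String) (out : Int) : Prop := out = solve_alt S
instance (S : String) (out : Int) : Decidable (Spec_solve S out) := by unfold Spec_solve; infer_instance

-- ===== CLAIM (what is proved, stated in full; the proofs are below) =====
def Claim_equal_solve : Prop := ∀ (S : String), Dom_solve S → Spec_solve S (solve S)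

-- ===== LEMMAS AND PROOFS =====

theorem pairXY_symm (a b : Char) : pairXY a b = pairXY b a := by
  simp [pairXY, Bool.or_comm, Bool.and_comm]

theorem mem_pair_iff (a c : Char) :
    (('x' : Char) ∈ [a, c] ∧ ('y' : Char) ∈ [a, c]) ↔ pairXY a c = true := by
  have hxy : ('x' : Char) ≠ 'y' := by decide
  simp only [List.mem_cons, List.not_mem_nil, or_false, pairXY, Bool.or_eq_true,
    Bool.and_eq_true, beq_iff_eq]
  constructor
  · rintro ⟨hx | hx, hy | hy⟩
    · exact absurd (hx.trans hy.symm) hxy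
    · exact Or.inl ⟨hx.symm, hy.symm⟩
    · exact Or.inr ⟨hy.symm, hx.symm⟩
    · exact absurd (hx.trans hy.symm) hxy
  · rintro (⟨ha, hc⟩ | ⟨ha, hc⟩) <;> subst ha <;> subst hc <;> simp

-- A's machine computes the forward greedy count of its input stream.
theorem loopA_eq_altLoop (R : List Char) :
    (∀ ans, loopA R [] ans = ans + altLoop R) ∧
    (∀ a ans, loopA R [a] ans = ans + altLoop (a :: R)) := by
  induction R with
  | nil =>
    constructor
    · intro ans; simp [loopA, altLoop]
    · intro a ans; simp [loopA, altLoop]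
  | cons c R ih =>
    constructor
    · intro ans
      have hxy : ¬ (R = [] ∧ ('x' : Char) ∈ [c] ∧ ('y' : Char) ∈ [c]) := by
        rintro ⟨-, hx, hy⟩
        simp at hx hy
        exact absurd (hx.trans hy.symm) (by decide)
      rw [loopA.eq_2]
      simp only [List.length_nil, List.nil_append]
      rw [if_pos (by omega), if_neg hxy]
      exact ih.2 c ans
    · intro a ans
      rw [loopA.eq_2]
      simp only [List.length_cons, List.length_nil, List.cons_append, List.nil_append]
      rw [if_pos (by omega)]
      rcases R with _ | ⟨c', R'⟩
      · -- S exhausted: the end-of-iteration check decides the final pair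
        by_cases h : pairXY a c = true
        · rw [if_pos ⟨rfl, (mem_pair_iff a c).mpr h⟩, loopA.eq_1]
          simp [altLoop, h]
        · rw [if_neg (by rintro ⟨-, hm⟩; exact h ((mem_pair_iff a c).mp hm)), loopA.eq_1]
          simp [altLoop, h]
      · rw [if_neg (by rintro ⟨h, -⟩; exact List.cons_ne_nil _ _ h)]
        -- next iteration: window [a, c] is full
        show loopA (c' :: R') [a, c] ans = _
        by_cases h : pairXY a c = true
        · rw [loopA.eq_2]
          simp only [List.length_cons, List.length_nil]
          rw [if_neg (by omega), if_pos ((mem_pair_iff a c).mpr h)]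
          rw [ih.1 (ans + 1)]
          simp [altLoop, h]; ring
        · rw [loopA.eq_2]
          simp only [List.length_cons, List.length_nil]
          rw [if_neg (by omega), if_neg (fun hm => h ((mem_pair_iff a c).mp hm))]
          show loopA (c' :: R') [c] ans = _
          rw [ih.2 c ans]
          simp [altLoop, h]

-- residual (pending unpaired character) of the forward greedy scan
def resG : List Char → Option Char
  | [] => none
  | [a] => some a
  | a :: b :: t => if pairXY a b then resG t else resG (b :: t)

-- length of the maximal pairable prefix chain
def chainLen : List Char → Nat
  | [] => 0
  | [_] => 1
  | a :: b :: t => if pairXY a b then 1 + chainLen (b :: t) else 1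

theorem altLoop_append_single (l : List Char) (x : Char) :
    altLoop (l ++ [x]) =
      altLoop l + (match resG l with
        | some p => if pairXY p x then 1 else 0
        | none => 0) := by
  induction l using altLoop.induct with
  | case1 a b t h ih =>
    rcases hr : resG t with _ | p <;>
      simp [List.cons_append, altLoop, resG, h, ih, hr, add_assoc]
  | case2 a b t h ih =>
    rw [List.cons_append] at ih ⊢
    rw [show altLoop (a :: ((b :: t) ++ [x])) = altLoop ((b :: t) ++ [x]) from by
          rw [List.cons_append]; rw [altLoop.eq_1, if_neg h],
        show altLoop (a :: b :: t) = altLoop (b :: t) from by rw [altLoop.eq_1, if_neg h],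
        show resG (a :: b :: t) = resG (b :: t) from by rw [resG.eq_3, if_neg h]]
    exact ih
  | case3 l h1 =>
    rcases l with _ | ⟨a, _ | ⟨b, t⟩⟩
    · simp [altLoop, resG]
    · simp only [List.cons_append, List.nil_append, altLoop, resG]
      by_cases h : pairXY a x = true <;> simp [h]
    · exact absurd rfl (h1 a b t)

theorem resG_append_single (l : List Char) (x : Char) :
    resG (l ++ [x]) =
      (match resG l with
        | some p => if pairXY p x then none else some x
        | none => some x) := by
  induction l using resG.induct with
  | case1 => simp [resG]
  | case2 a =>
    by_cases h : pairXY a x = true <;> simp [resG, h]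
  | case3 a b t h ih =>
    rw [List.cons_append, List.cons_append, resG.eq_3, if_pos h, resG.eq_3, if_pos h]
    exact ih
  | case4 a b t h ih =>
    rw [List.cons_append] at ih ⊢
    rw [show resG (a :: ((b :: t) ++ [x])) = resG ((b :: t) ++ [x]) from by
          rw [List.cons_append]; rw [resG.eq_3, if_neg h],
        show resG (a :: b :: t) = resG (b :: t) from by rw [resG.eq_3, if_neg h]]
    exact ih

theorem resG_reverse (l : List Char) :
    resG l.reverse = if chainLen l % 2 = 1 then l.head? else none := by
  induction l with
  | nil => simp [resG, chainLen]
  | cons a l ih =>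
    rw [List.reverse_cons, resG_append_single, ih]
    rcases l with _ | ⟨b, t⟩
    · simp [chainLen]
    · simp only [chainLen, List.head?_cons]
      by_cases hp : pairXY a b = true
      · by_cases ho : chainLen (b :: t) % 2 = 1
        · simp [ho, hp, pairXY_symm b a, Nat.add_mod, Nat.mod_self]
        · simp [ho, hp]; omega
      · by_cases ho : chainLen (b :: t) % 2 = 1 <;>
          simp [ho, hp, pairXY_symm b a]

theorem altLoop_cons (a : Char) (l : List Char) :
    altLoop (a :: l) =
      altLoop l + (match l.head? with
        | some b => if pairXY a b ∧ chainLen l % 2 = 1 then 1 else 0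
        | none => 0) := by
  induction l generalizing a with
  | nil => simp [altLoop]
  | cons b t ih =>
    simp only [List.head?_cons]
    by_cases hab : pairXY a b = true
    · simp only [altLoop, hab, if_true]
      rcases t with _ | ⟨c, t'⟩
      · simp [altLoop, chainLen]
      · simp only [chainLen, hab]
        rw [ih b]
        simp only [List.head?_cons]
        by_cases hbc : pairXY b c = true
        · by_cases ho : chainLen (c :: t') % 2 = 1 <;>
            simp [hbc, ho, Nat.add_mod] <;> omega
        · simp [hbc]; omega
    · simp [altLoop, hab]

theorem altLoop_reverse (l : List Char) : altLoop l.reverse = altLoop l := by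
  induction l with
  | nil => rfl
  | cons a l ih =>
    rw [List.reverse_cons, altLoop_append_single, ih, resG_reverse, altLoop_cons a l]
    rcases l with _ | ⟨b, t⟩
    · simp [chainLen]
    · simp only [List.head?_cons]
      by_cases ho : chainLen (b :: t) % 2 = 1 <;>
        by_cases hp : pairXY a b = true <;>
          simp [ho, hp, pairXY_symm b a]

-- ===== VERDICT (by name: the statement is the Claim_ definition above) =====
theorem solve_spec : Claim_equal_solve := by
  intro S _
  unfold Spec_solve solve solve_alt
  rw [(loopA_eq_altLoop S.toList.reverse).1 0, altLoop_reverse]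
  simp
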